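-- pv_equiv track=rewrite | github.com/Richardyun01/2025-Capstone-2-backend | services/features/extract_streams2.py | max_consecutive_packets
-- ===== SOURCE A (Python) =====
-- def max_consecutive_packets(lengths, target=1090, tol=50):
--     max_count = count = 0
--     for l in lengths:
--         if abs(l - target) <= tol:
--             count += 1
--             max_count = max(max_count, count)
--         else:
--             count = 0
--     return max_count
-- ===== SOURCE B (Python) =====
-- def max_consecutive_packets(lengths, target=1090, tol=50):
--     # segment the stream into maximal runs of equal match/non-match, then take
--     # the longest matching run (0 if there is none)
--     runs = []  # list of (is_match, run_length)
--     for l in lengths: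
--         b = abs(l - target) <= tol
--         if runs and runs[-1][0] == b:
--             runs[-1] = (b, runs[-1][1] + 1)
--         else:
--             runs.append((b, 1))
--     return max((n for b, n in runs if b), default=0)
-- ===== Notes on version B (the rewrite author's own statement) =====
-- stated objective: alternative
-- what changed: Replaces the running counter-with-reset and running maximum by a two-phase segment-then-reduce shape: first collapse the stream into maximal runs of equal match/non-match, then take the maximum length among matching runs (default 0).
import Mathlib
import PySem

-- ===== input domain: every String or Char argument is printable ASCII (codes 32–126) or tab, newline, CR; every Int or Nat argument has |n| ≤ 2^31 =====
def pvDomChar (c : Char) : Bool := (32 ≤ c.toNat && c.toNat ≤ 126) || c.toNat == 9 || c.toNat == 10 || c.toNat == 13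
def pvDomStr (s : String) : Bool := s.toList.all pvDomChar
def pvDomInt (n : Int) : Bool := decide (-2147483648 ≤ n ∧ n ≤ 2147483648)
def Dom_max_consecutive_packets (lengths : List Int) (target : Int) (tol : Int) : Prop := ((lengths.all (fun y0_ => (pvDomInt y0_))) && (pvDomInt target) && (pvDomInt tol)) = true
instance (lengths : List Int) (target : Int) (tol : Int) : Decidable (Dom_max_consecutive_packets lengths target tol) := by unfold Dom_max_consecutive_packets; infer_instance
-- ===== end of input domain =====

-- B replaces A's running counter-with-reset by a segment-then-reduce shape (collapse into runs, then max over matching runs); alternative decomposition, same O(n) cost.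


-- ===== PORT A =====
-- literal port of A: one fold carrying (max_count, count)
def max_consecutive_packets (lengths : List Int) (target : Int) (tol : Int) : Int :=
  (lengths.foldl
    (fun (s : Int × Int) l =>
      if |l - target| ≤ tol then (max s.1 (s.2 + 1), s.2 + 1) else (s.1, 0))
    (0, 0)).1

-- ===== PORT B =====
-- literal port of B: first collapse the stream into runs of equal match/non-match
-- (Python appends/updates at the END of `runs`; the Lean fold keeps the current run
-- at the HEAD of the list, i.e. the runs list is stored reversed — the final max
-- over matching runs does not depend on the order), then max with default 0.
def max_consecutive_packets_alt (lengths : List Int) (target : Int) (tol : Int) : Int :=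
  let runs : List (Bool × Int) :=
    lengths.foldl
      (fun acc l =>
        let b : Bool := decide (|l - target| ≤ tol)
        match acc with
        | (k, n) :: t => if k == b then (k, n + 1) :: t else (b, 1) :: (k, n) :: t
        | [] => [(b, 1)])
      []
  (runs.filterMap (fun p => if p.1 then some p.2 else none)).foldl max 0

-- ===== PRECONDITION & SPEC =====
def Spec_max_consecutive_packets (lengths : List Int) (target : Int) (tol : Int) (out : Int) : Prop := out = max_consecutive_packets_alt lengths target tol
instance (lengths : List Int) (target : Int) (tol : Int) (out : Int) : Decidable (Spec_max_consecutive_packets lengths target tol out) := by unfold Spec_max_consecutive_packets; infer_instance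

-- ===== CLAIM (what is proved, stated in full; the proofs are below) =====
def Claim_equal_max_consecutive_packets : Prop := ∀ (lengths : List Int) (target : Int) (tol : Int), Dom_max_consecutive_packets lengths target tol → Spec_max_consecutive_packets lengths target tol (max_consecutive_packets lengths target tol)

-- ===== LEMMAS AND PROOFS =====

-- max over the matching runs of an accumulator, foldr form (nice cons equations)
def pvMT (acc : List (Bool × Int)) : Int :=
  acc.foldr (fun p r => if p.1 then max p.2 r else r) 0

-- the "current count" encoded by an accumulator: head run length if it matches
def pvHC (acc : List (Bool × Int)) : Int :=
  match acc with
  | (true, n) :: _ => n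
  | _ => 0

lemma pvFoldrMax_max (l : List Int) (a x : Int) :
    l.foldr max (max a x) = max x (l.foldr max a) := by
  induction l with
  | nil => exact max_comm a x
  | cons y t ih =>
      simp only [List.foldr, ih]
      rw [max_left_comm]

lemma pvFoldlMax_eq_foldr (l : List Int) : ∀ a : Int, l.foldl max a = l.foldr max a := by
  induction l with
  | nil => intro a; rfl
  | cons x t ih =>
      intro a
      simp only [List.foldl, List.foldr, ih, pvFoldrMax_max]

lemma pvMT_eq (acc : List (Bool × Int)) :
    (acc.filterMap (fun p => if p.1 then some p.2 else none)).foldl max 0 = pvMT acc := by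
  rw [pvFoldlMax_eq_foldr]
  induction acc with
  | nil => rfl
  | cons p t ih =>
      cases p with
      | mk k n =>
        cases k <;> simp [pvMT, List.filterMap, List.foldr] at ih ⊢ <;> rw [← ih]

-- main invariant: A's fold state (m, c) is determined by B's runs accumulator
lemma pvMain (target tol : Int) : ∀ (lengths : List Int) (m c : Int) (acc : List (Bool × Int)),
    c = pvHC acc → m = pvMT acc →
    (lengths.foldl
      (fun (s : Int × Int) l =>
        if |l - target| ≤ tol then (max s.1 (s.2 + 1), s.2 + 1) else (s.1, 0))
      (m, c)).1
      =
    pvMT (lengths.foldl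
      (fun acc l =>
        let b : Bool := decide (|l - target| ≤ tol)
        match acc with
        | (k, n) :: t => if k == b then (k, n + 1) :: t else (b, 1) :: (k, n) :: t
        | [] => [(b, 1)]) acc) := by
  intro lengths
  induction lengths with
  | nil => intro m c acc hc hm; simpa using hm
  | cons l t ih =>
      intro m c acc hc hm
      by_cases hb : |l - target| ≤ tol
      · -- matching element
        have hbt : (decide (|l - target| ≤ tol)) = true := by simp [hb]
        simp only [List.foldl]
        rw [if_pos hb, hbt]
        match acc with
        | [] =>
            simp [pvHC] at hc; simp [pvMT] at hm
            exact ih _ _ [(true, 1)]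
              (by simp [pvHC]; omega) (by simp [pvMT]; omega)
        | (true, n) :: t' =>
            simp [pvHC] at hc; simp [pvMT] at hm
            exact ih _ _ ((true, n + 1) :: t')
              (by simp [pvHC]; omega) (by simp [pvMT]; omega)
        | (false, n) :: t' =>
            simp [pvHC] at hc; simp [pvMT] at hm
            exact ih _ _ ((true, 1) :: (false, n) :: t')
              (by simp [pvHC]; omega) (by simp [pvMT]; omega)
      · -- non-matching element
        have hbf : (decide (|l - target| ≤ tol)) = false := by simp [hb]
        simp only [List.foldl]
        rw [if_neg hb, hbf]
        match acc with
        | [] =>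
            simp [pvMT] at hm
            exact ih _ _ [(false, 1)]
              (by simp [pvHC]) (by simp [pvMT]; omega)
        | (true, n) :: t' =>
            simp [pvMT] at hm
            exact ih _ _ ((false, 1) :: (true, n) :: t')
              (by simp [pvHC]) (by simp [pvMT]; omega)
        | (false, n) :: t' =>
            simp [pvMT] at hm
            exact ih _ _ ((false, n + 1) :: t')
              (by simp [pvHC]) (by simp [pvMT]; omega)

-- ===== VERDICT (by name: the statement is the Claim_ definition above) =====
theorem max_consecutive_packets_spec : Claim_equal_max_consecutive_packets := by
  intro lengths target tol _
  show _ = _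
  unfold max_consecutive_packets max_consecutive_packets_alt
  rw [pvMT_eq]
  exact pvMain target tol lengths 0 0 [] rfl rfl
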